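-- pv_equiv track=rewrite | github.com/CaioTeixeira95/advent-of-code-2022 | 05/part_1.py | parse_crane
-- ===== SOURCE A (Python) =====
-- def parse_crane(line: str) -> list[str]:
--     empty_spaces = 0
--     cranes = []
--     for elem in line.split(" "):
--         if elem or empty_spaces == 3:
--             cranes.append(elem)
--             empty_spaces = 0
--         elif not elem and empty_spaces < 3:
--             empty_spaces += 1
--
--     return cranes
-- ===== SOURCE B (Python) =====
-- def parse_crane(line):
--     toks = line.split(" ")
--     out = []
--     i = 0
--     n = len(toks)
--     while i < n:
--         if toks[i]:
--             out.append(toks[i])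
--             i += 1
--         else:
--             j = i
--             while j < n and not toks[j]:
--                 j += 1
--             out.extend([""] * ((j - i) // 4))
--             i = j
--     return out
-- ===== Notes on version B (the rewrite author's own statement) =====
-- stated objective: alternative
-- what changed: B replaces A's streaming empty-space counter state machine with run-length grouping: it scans each maximal run of empty tokens at once and emits run_length // 4 empty strings, interleaved with the nonempty tokens.
import Mathlib
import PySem

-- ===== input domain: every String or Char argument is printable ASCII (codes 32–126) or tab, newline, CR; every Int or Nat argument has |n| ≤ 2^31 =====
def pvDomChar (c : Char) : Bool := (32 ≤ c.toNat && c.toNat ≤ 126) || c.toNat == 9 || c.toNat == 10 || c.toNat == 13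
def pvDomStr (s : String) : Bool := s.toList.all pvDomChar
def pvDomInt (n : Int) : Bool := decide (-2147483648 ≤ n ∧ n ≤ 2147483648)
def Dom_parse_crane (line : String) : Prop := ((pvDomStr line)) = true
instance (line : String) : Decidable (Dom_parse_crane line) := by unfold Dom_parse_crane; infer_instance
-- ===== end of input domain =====

-- B replaces A's streaming empty-space counter with run-length grouping (one "" per 4 consecutive
-- empty tokens, computed by integer division on each maximal run); same cost, different structure.

-- ===== PORT A =====
-- A: fold over the tokens carrying (empty_spaces, cranes); appends on a nonempty token or when the
-- counter has reached 3, otherwise increments the counter (capped by the elif guard).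
-- line.split(" ") = PySem.Str.split? line " "; the separator is the nonempty literal " ", so the
-- Option is always some and .getD [] is exact.
def parse_crane (line : String) : List String :=
  ((((PySem.Str.split? line " ").getD []).foldl
      (fun (st : Nat × List String) elem =>
        if elem ≠ "" ∨ st.1 = 3 then (0, st.2 ++ [elem])
        else if elem = "" ∧ st.1 < 3 then (st.1 + 1, st.2)
        else st)
      (0, []))).2

-- ===== PORT B =====
-- B: run-length grouping. On a nonempty head keep it; on an empty head measure the whole maximal
-- run of empties (1 + leading empties of the tail), emit run/4 copies of "", skip past the run.
def parse_crane_altGo (toks : List String) : List String :=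
  match toks with
  | [] => []
  | t :: rest =>
    if t ≠ "" then t :: parse_crane_altGo rest
    else
      let k := (rest.takeWhile (· = "")).length
      List.replicate ((k + 1) / 4) "" ++ parse_crane_altGo (rest.drop k)
termination_by toks.length
decreasing_by all_goals simp

def parse_crane_alt (line : String) : List String :=
  parse_crane_altGo ((PySem.Str.split? line " ").getD [])

-- ===== PRECONDITION & SPEC =====
def Spec_parse_crane (line : String) (out : List String) : Prop := out = parse_crane_alt line
instance (line : String) (out : List String) : Decidable (Spec_parse_crane line out) := by unfold Spec_parse_crane; infer_instance

-- ===== CLAIM (what is proved, stated in full; the proofs are below) =====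
def Claim_equal_parse_crane : Prop := ∀ (line : String), Dom_parse_crane line → Spec_parse_crane line (parse_crane line)

-- ===== LEMMAS AND PROOFS =====

-- A's loop as a clean recursion on the token list with counter c.
def pvGoA (c : Nat) (toks : List String) : List String :=
  match toks with
  | [] => []
  | t :: rest =>
    if t ≠ "" ∨ c = 3 then t :: pvGoA 0 rest
    else if t = "" ∧ c < 3 then pvGoA (c + 1) rest
    else pvGoA c rest

-- the foldl accumulates acc ++ pvGoA c toks
theorem pvFoldA (toks : List String) (c : Nat) (acc : List String) :
    (toks.foldl
      (fun (st : Nat × List String) elem =>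
        if elem ≠ "" ∨ st.1 = 3 then (0, st.2 ++ [elem])
        else if elem = "" ∧ st.1 < 3 then (st.1 + 1, st.2)
        else st)
      (c, acc)).2 = acc ++ pvGoA c toks := by
  induction toks generalizing c acc with
  | nil => simp [pvGoA]
  | cons t rest ih =>
    by_cases ht : t = "" <;> by_cases hc : c = 3 <;> by_cases hlt : c < 3 <;>
      simp [pvGoA, ht, hc, hlt, ih]

theorem pvDropWhileDrop {α : Type} (p : α → Bool) (l : List α) :
    l.dropWhile p = l.drop (l.takeWhile p).length := by
  induction l with
  | nil => rfl
  | cons x xs ih => by_cases h : p x <;> simp [List.dropWhile, List.takeWhile, h, ih]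

theorem pvTakeWhile_replicate_append (m : Nat) (l : List String)
    (hl : l.head? ≠ some "") :
    (List.replicate m "" ++ l).takeWhile (· = "") = List.replicate m "" := by
  induction m with
  | zero =>
    cases l with
    | nil => simp
    | cons x xs =>
      simp only [List.head?_cons, ne_eq, Option.some.injEq] at hl
      simp [hl]
  | succ n ih => simp [List.replicate_succ, ih]

-- run-length lemma: B on (replicate m "" ++ l), l not starting with ""
theorem pvAltRun (m : Nat) (l : List String) (hl : l.head? ≠ some "") :
    parse_crane_altGo (List.replicate m "" ++ l)
      = List.replicate (m / 4) "" ++ parse_crane_altGo l := by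
  cases m with
  | zero => simp
  | succ n =>
    rw [List.replicate_succ, List.cons_append, parse_crane_altGo]
    simp only [ne_eq, not_true_eq_false, reduceIte]
    rw [pvTakeWhile_replicate_append n l hl]
    simp

theorem pvAltCons_nonempty (t : String) (l : List String) (ht : t ≠ "") :
    parse_crane_altGo (t :: l) = t :: parse_crane_altGo l := by
  rw [parse_crane_altGo]; simp [ht]

theorem pvDecomp (l : List String) :
    l = List.replicate ((l.takeWhile (· = "")).length) ""
        ++ l.drop (l.takeWhile (· = "")).length
      ∧ (l.drop (l.takeWhile (· = "")).length).head? ≠ some "" := by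
  constructor
  · conv_lhs => rw [← List.takeWhile_append_dropWhile (p := (· = "")) (l := l)]
    rw [pvDropWhileDrop]
    congr 1
    have h : ∀ x ∈ l.takeWhile (· = ""), x = "" := by
      intro x hx
      have := List.mem_takeWhile_imp hx
      simpa using this
    exact List.eq_replicate_of_mem h
  · rw [← pvDropWhileDrop]
    cases hh : (l.dropWhile (· = "")).head? with
    | none => simp
    | some x =>
      have := List.head?_dropWhile_not (p := (· = "")) (l := l)
      rw [hh] at this
      simp only [ne_eq, Option.some.injEq]
      intro h; subst h; simp at this

-- main bridge: A's recursion with counter c ≤ 3 equals B's recursion on c extra leading empties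
theorem pvMain (toks : List String) : ∀ c, c ≤ 3 →
    pvGoA c toks = parse_crane_altGo (List.replicate c "" ++ toks) := by
  induction toks with
  | nil =>
    intro c hc
    have h0 : c / 4 = 0 := Nat.div_eq_of_lt (by omega)
    calc pvGoA c [] = [] := by simp [pvGoA]
      _ = List.replicate (c / 4) "" ++ parse_crane_altGo [] := by
            simp [parse_crane_altGo, h0]
      _ = parse_crane_altGo (List.replicate c "" ++ []) := (pvAltRun c [] (by simp)).symm
  | cons t rest ih =>
    intro c hc
    by_cases ht : t = ""
    · subst ht
      by_cases hc3 : c = 3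
      · subst hc3
        obtain ⟨hdec, hhd⟩ := pvDecomp rest
        set e := (rest.takeWhile (· = "")).length with he
        have hr : parse_crane_altGo rest
            = List.replicate (e / 4) "" ++ parse_crane_altGo (rest.drop e) := by
          conv_lhs => rw [hdec]
          exact pvAltRun e _ hhd
        have hlhs : pvGoA 3 ("" :: rest) = "" :: pvGoA 0 rest := by
          rw [pvGoA]; simp
        have hih : pvGoA 0 rest = parse_crane_altGo rest := by simpa using ih 0 (by omega)
        have hrw : List.replicate 3 "" ++ "" :: rest = List.replicate (4 + e) "" ++ rest.drop e := by
          conv_lhs => rw [hdec]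
          rw [show 4 + e = 3 + (1 + e) from by omega, List.replicate_add, List.append_assoc]
          congr 1
          rw [Nat.add_comm, List.replicate_succ]
          simp
        rw [hlhs, hih, hr, hrw, pvAltRun (4 + e) _ hhd]
        have h4 : (4 + e) / 4 = e / 4 + 1 := by omega
        rw [h4, List.replicate_succ]
        simp
      · rw [pvGoA]
        have hlt : c < 3 := by omega
        simp only [ne_eq, not_true_eq_false, false_or, hc3, reduceIte, hlt, and_true]
        rw [ih (c + 1) (by omega)]
        congr 1
        simp [List.replicate_succ']
    · rw [pvGoA]
      simp only [ht, reduceIte, ne_eq, not_false_eq_true, true_or]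
      rw [pvAltRun c (t :: rest) (by simp [ht]), Nat.div_eq_of_lt (by omega)]
      rw [pvAltCons_nonempty t rest ht, ih 0 (by omega)]
      simp

-- ===== VERDICT (by name: the statement is the Claim_ definition above) =====
theorem parse_crane_spec : Claim_equal_parse_crane := by
  intro line _
  unfold Spec_parse_crane parse_crane parse_crane_alt
  rw [pvFoldA]
  simpa using (pvMain ((PySem.Str.split? line " ").getD []) 0 (by omega)).symm.symm
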